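-- pv_equiv track=rewrite | github.com/SamuelLess/marjapussi-rs | ml/self_play.py | heuristic_select
-- ===== SOURCE A (Python) =====
-- def heuristic_select(legal: list[dict]) -> int:
--     """Python-side heuristic (mirrors Rust heuristic_policy)."""
--     # Prefer trump announcements
--     for i, la in enumerate(legal):
--         if la['action_token'] == 44:  # ACT_TRUMP
--             return i
--     # Prefer Ace (value 8)
--     for i, la in enumerate(legal):
--         if la.get('card_idx') is not None and la['card_idx'] % 9 == 8:
--             return i
--     # Prefer Ten (value 7)
--     for i, la in enumerate(legal):
--         if la.get('card_idx') is not None and la['card_idx'] % 9 == 7: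
--             return i
--     # Prefer StopBidding
--     for i, la in enumerate(legal):
--         if la['action_token'] == 42:  # ACT_PASS_STOP
--             return i
--     return 0
-- ===== SOURCE B (Python) =====
-- def heuristic_select(legal: list[dict]) -> int:
--     """Single pass: track the best (lowest) priority seen; early return on trump."""
--     best_index, best_priority = 0, 5
--     for i, la in enumerate(legal):
--         token = la['action_token']
--         if token == 44:  # ACT_TRUMP: nothing beats it, stop here
--             return i
--         ci = la.get('card_idx')
--         if ci is not None and ci % 9 == 8:      # Ace
--             p = 2
--         elif ci is not None and ci % 9 == 7:    # Ten
--             p = 3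
--         elif token == 42:                       # StopBidding
--             p = 4
--         else:
--             p = 5
--         if p < best_priority:
--             best_priority, best_index = p, i
--     return best_index
-- ===== Notes on version B (the rewrite author's own statement) =====
-- stated objective: faster
-- what changed: Replaces A's four sequential scans over the whole list with a single pass that tracks the best priority and its first index (early-returning on trump), so the list is traversed once instead of up to four times.
import Mathlib
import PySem

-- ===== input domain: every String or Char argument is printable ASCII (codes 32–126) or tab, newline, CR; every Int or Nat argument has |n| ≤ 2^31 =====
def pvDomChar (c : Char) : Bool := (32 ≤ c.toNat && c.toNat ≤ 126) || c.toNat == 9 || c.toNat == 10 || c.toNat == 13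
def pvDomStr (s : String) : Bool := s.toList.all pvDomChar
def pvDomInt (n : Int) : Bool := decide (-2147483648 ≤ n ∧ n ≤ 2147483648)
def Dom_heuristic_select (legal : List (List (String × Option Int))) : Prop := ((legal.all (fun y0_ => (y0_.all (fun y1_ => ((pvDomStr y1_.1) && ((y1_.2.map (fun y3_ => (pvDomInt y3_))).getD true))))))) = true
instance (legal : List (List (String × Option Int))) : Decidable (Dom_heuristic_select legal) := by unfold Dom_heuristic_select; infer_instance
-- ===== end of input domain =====

-- B is a single pass over the list maintaining the best priority (early return on trump),
-- replacing A's four sequential scans; equivalence is about the return value only.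

-- ===== PORT A =====
-- la['action_token'] == 44 : missing key would be a KeyError in Python (excluded by Pre_);
-- the total port treats a missing key as 'not equal'.
def pvIsTok44 (la : List (String × Option Int)) : Bool :=
  (PySem.Dict.mk la).get? "action_token" == some (some 44)

def pvIsTok42 (la : List (String × Option Int)) : Bool :=
  (PySem.Dict.mk la).get? "action_token" == some (some 42)

-- la.get('card_idx') is not None and la['card_idx'] % 9 == 8 (resp. 7)
def pvIsAce (la : List (String × Option Int)) : Bool :=
  match (PySem.Dict.mk la).get? "card_idx" with
  | some (some c) => PySem.Int.mod c 9 == 8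
  | _ => false

def pvIsTen (la : List (String × Option Int)) : Bool :=
  match (PySem.Dict.mk la).get? "card_idx" with
  | some (some c) => PySem.Int.mod c 9 == 7
  | _ => false

-- one 'for i, la in enumerate(legal): if q(la): return i' loop of A
def pvFind (q : List (String × Option Int) → Bool) :
    List (List (String × Option Int)) → Int → Option Int
  | [], _ => none
  | la :: rest, i => if q la then some i else pvFind q rest (i + 1)

def heuristic_select (legal : List (List (String × Option Int))) : Int :=
  match pvFind pvIsTok44 legal 0 with
  | some i => i
  | none =>
    match pvFind pvIsAce legal 0 with
    | some i => i
    | none =>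
      match pvFind pvIsTen legal 0 with
      | some i => i
      | none =>
        match pvFind pvIsTok42 legal 0 with
        | some i => i
        | none => 0

-- ===== PORT B =====
-- single pass: i = current index, bi = best_index, bp = best_priority
def pvLoopB : List (List (String × Option Int)) → Int → Int → Int → Int
  | [], _, bi, _ => bi
  | la :: rest, i, bi, bp =>
    if pvIsTok44 la then i
    else
      let p : Int := if pvIsAce la then 2 else if pvIsTen la then 3
                     else if pvIsTok42 la then 4 else 5
      if p < bp then pvLoopB rest (i + 1) i p else pvLoopB rest (i + 1) bi bp

def heuristic_select_alt (legal : List (List (String × Option Int))) : Int :=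
  pvLoopB legal 0 0 5

-- ===== PRECONDITION & SPEC =====
-- Pre_ excludes exactly the inputs on which Python A raises KeyError: an item lacking the
-- 'action_token' key that the first loop reaches (i.e. not preceded by a trump item).
def Pre_heuristic_select (legal : List (List (String × Option Int))) : Prop :=
  ∀ j, j < legal.length → (PySem.Dict.mk (legal.getD j [])).get? "action_token" = none →
    ∃ k, k < j ∧ pvIsTok44 (legal.getD k []) = true

instance (legal : List (List (String × Option Int))) : Decidable (Pre_heuristic_select legal) := by
  unfold Pre_heuristic_select; infer_instance

def pvWitness_heuristic_select : (List (List (String × Option Int))) :=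
  [[("action_token", some 42), ("card_idx", some 8)], [("action_token", none)]]

def Spec_heuristic_select (legal : List (List (String × Option Int))) (out : Int) : Prop := out = heuristic_select_alt legal
instance (legal : List (List (String × Option Int))) (out : Int) : Decidable (Spec_heuristic_select legal out) := by unfold Spec_heuristic_select; infer_instance

-- ===== CLAIM (what is proved, stated in full; the proofs are below) =====
def Claim_equal_heuristic_select : Prop := ∀ (legal : List (List (String × Option Int))), Dom_heuristic_select legal → Pre_heuristic_select legal → Spec_heuristic_select legal (heuristic_select legal)

-- ===== LEMMAS AND PROOFS =====

-- priority-2/3/4 indicators (the priority B assigns, as a predicate)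
def pvQ2 (la : List (String × Option Int)) : Bool := !pvIsTok44 la && pvIsAce la
def pvQ3 (la : List (String × Option Int)) : Bool := !pvIsTok44 la && !pvIsAce la && pvIsTen la
def pvQ4 (la : List (String × Option Int)) : Bool :=
  !pvIsTok44 la && !pvIsAce la && !pvIsTen la && pvIsTok42 la

-- reference form: A's chain of scans, with the levels below bp switched off
def pvRHS (l : List (List (String × Option Int))) (i bi bp : Int) : Int :=
  match pvFind pvIsTok44 l i with
  | some j => j
  | none =>
    match (if 2 < bp then pvFind pvQ2 l i else none) with
    | some j => j
    | none =>
      match (if 3 < bp then pvFind pvQ3 l i else none) with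
      | some j => j
      | none =>
        match (if 4 < bp then pvFind pvQ4 l i else none) with
        | some j => j
        | none => bi

theorem pvFind_congr {q q' : List (String × Option Int) → Bool}
    {l : List (List (String × Option Int))} (h : ∀ la ∈ l, q la = q' la) :
    ∀ i, pvFind q l i = pvFind q' l i := by
  induction l with
  | nil => intro i; rfl
  | cons la rest ih =>
    intro i
    have h0 : q la = q' la := h la (List.mem_cons_self ..)
    simp only [pvFind, h0]
    split
    · rfl
    · exact ih (fun x hx => h x (List.mem_cons_of_mem _ hx)) (i + 1)

theorem pvFind_eq_none {q : List (String × Option Int) → Bool}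
    {l : List (List (String × Option Int))} :
    ∀ i, pvFind q l i = none → ∀ la ∈ l, q la = false := by
  induction l with
  | nil => intro _ _ la hla; cases hla
  | cons x rest ih =>
    intro i h la hla
    simp only [pvFind] at h
    by_cases hq : q x
    · simp [hq] at h
    · rcases List.mem_cons.mp hla with hla' | hla'
      · subst hla'; simpa using hq
      · exact ih (i + 1) (by simpa [hq] using h) la hla'

theorem pvLoopB_eq_pvRHS :
    ∀ (l : List (List (String × Option Int))) (i bi bp : Int),
      2 ≤ bp → bp ≤ 5 → pvLoopB l i bi bp = pvRHS l i bi bp := by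
  intro l
  induction l with
  | nil => intro i bi bp _ _; simp [pvLoopB, pvRHS, pvFind]
  | cons la rest ih =>
    intro i bi bp h2 h5
    by_cases htok : pvIsTok44 la
    · simp [pvLoopB, pvRHS, pvFind, htok]
    · by_cases hace : pvIsAce la
      · -- p = 2
        by_cases hlt : (2:Int) < bp
        · rw [show pvLoopB (la :: rest) i bi bp = pvLoopB rest (i+1) i 2 by
            simp [pvLoopB, htok, hace, hlt]]
          rw [ih (i+1) i 2 le_rfl (by omega)]
          simp only [pvRHS, pvFind, htok, hace, pvQ2, if_neg,
            Bool.false_eq_true, not_false_eq_true, hlt, if_pos]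
          simp
        · -- bp = 2: no improvement
          have hbp : bp = 2 := by omega
          subst hbp
          rw [show pvLoopB (la :: rest) i bi 2 = pvLoopB rest (i+1) bi 2 by
            simp [pvLoopB, htok, hace]]
          rw [ih (i+1) bi 2 le_rfl (by omega)]
          simp [pvRHS, pvFind, htok]
      · by_cases hten : pvIsTen la
        · -- p = 3
          by_cases hlt : (3:Int) < bp
          · rw [show pvLoopB (la :: rest) i bi bp = pvLoopB rest (i+1) i 3 by
              simp [pvLoopB, htok, hace, hten, hlt]]
            rw [ih (i+1) i 3 (by omega) (by omega)]
            have h2bp : (2:Int) < bp := by omega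
            simp only [pvRHS, pvFind, htok, pvQ2, pvQ3, hace, hten]
            simp [hlt, h2bp]
          · -- bp ≤ 3: no improvement
            rw [show pvLoopB (la :: rest) i bi bp = pvLoopB rest (i+1) bi bp by
              simp [pvLoopB, htok, hace, hten]; omega]
            rw [ih (i+1) bi bp h2 h5]
            have hq2 : pvQ2 la = false := by simp [pvQ2, hace]
            simp [pvRHS, pvFind, htok, hq2, show ¬ (3:Int) < bp from hlt,
              show ¬ (4:Int) < bp by omega]
        · by_cases h42 : pvIsTok42 la
          · -- p = 4
            by_cases hlt : (4:Int) < bp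
            · rw [show pvLoopB (la :: rest) i bi bp = pvLoopB rest (i+1) i 4 by
                simp [pvLoopB, htok, hace, hten, h42, hlt]]
              rw [ih (i+1) i 4 (by omega) (by omega)]
              have hbp : bp = 5 := by omega
              subst hbp
              simp only [pvRHS, pvFind, htok, pvQ2, pvQ3, pvQ4, hace, hten, h42]
              simp
            · -- bp ≤ 4: no improvement
              rw [show pvLoopB (la :: rest) i bi bp = pvLoopB rest (i+1) bi bp by
                simp [pvLoopB, htok, hace, hten, h42]; omega]
              rw [ih (i+1) bi bp h2 h5]
              have hq2 : pvQ2 la = false := by simp [pvQ2, hace]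
              have hq3 : pvQ3 la = false := by simp [pvQ3, hten]
              simp [pvRHS, pvFind, htok, hq2, hq3, show ¬ (4:Int) < bp from hlt]
          · -- p = 5: never an improvement
            rw [show pvLoopB (la :: rest) i bi bp = pvLoopB rest (i+1) bi bp by
              simp [pvLoopB, htok, hace, hten, h42]; omega]
            rw [ih (i+1) bi bp h2 h5]
            have hq2 : pvQ2 la = false := by simp [pvQ2, hace]
            have hq3 : pvQ3 la = false := by simp [pvQ3, hten]
            have hq4 : pvQ4 la = false := by simp [pvQ4, h42]
            simp [pvRHS, pvFind, htok, hq2, hq3, hq4]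

-- ===== VERDICT (by name: the statement is the Claim_ definition above) =====
theorem heuristic_select_spec : Claim_equal_heuristic_select := by
  intro legal _ _
  unfold Spec_heuristic_select heuristic_select_alt
  rw [pvLoopB_eq_pvRHS legal 0 0 5 (by omega) (by omega)]
  unfold heuristic_select pvRHS
  simp only [show ((2:Int) < 5) = True by simp, show ((3:Int) < 5) = True by simp,
    show ((4:Int) < 5) = True by simp, if_true]
  cases h1 : pvFind pvIsTok44 legal 0 with
  | some j => rfl
  | none =>
    have n1 := pvFind_eq_none 0 h1
    rw [pvFind_congr (q := pvIsAce) (q' := pvQ2)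
      (fun la hla => by simp [pvQ2, n1 la hla]) 0]
    cases h2 : pvFind pvQ2 legal 0 with
    | some j => rfl
    | none =>
      have n2 := pvFind_eq_none 0 h2
      have nace : ∀ la ∈ legal, pvIsAce la = false := fun la hla => by
        have := n2 la hla; simpa [pvQ2, n1 la hla] using this
      rw [pvFind_congr (q := pvIsTen) (q' := pvQ3)
        (fun la hla => by simp [pvQ3, n1 la hla, nace la hla]) 0]
      cases h3 : pvFind pvQ3 legal 0 with
      | some j => rfl
      | none =>
        have n3 := pvFind_eq_none 0 h3
        have nten : ∀ la ∈ legal, pvIsTen la = false := fun la hla => by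
          have := n3 la hla; simpa [pvQ3, n1 la hla, nace la hla] using this
        rw [pvFind_congr (q := pvIsTok42) (q' := pvQ4)
          (fun la hla => by simp [pvQ4, n1 la hla, nace la hla, nten la hla]) 0]
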